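-- pv_equiv track=rewrite | github.com/nitpicker55555/geo_partial | ask_functions_agent.py | find_keys_by_values
-- ===== SOURCE A (Python) =====
-- def find_keys_by_values(d, elements):
--     result = {}
--     for key, values in d.items():
--         matched_elements = [element for element in elements if
--                             element in values]
--         if matched_elements:
--             result[key] = matched_elements
--     return result
-- ===== SOURCE B (Python) =====
-- def find_keys_by_values(d, elements):
--     # inverted index: value-member -> keys (d order), then one pass over elements
--     pairs = [(v, k) for k, values in d.items() for v in dict.fromkeys(values)]
--     index = {}
--     for v, k in pairs:
--         index.setdefault(v, []).append(k)
--     hits = [(k, e) for e in elements for k in index.get(e, [])]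
--     buckets = {}
--     for k, e in hits:
--         buckets.setdefault(k, []).append(e)
--     result = {}
--     for k in d:
--         if k in buckets:
--             result[k] = buckets[k]
--     return result
-- ===== Notes on version B (the rewrite author's own statement) =====
-- stated objective: faster
-- what changed: Replaces A's per-key rescan of elements (with a list-membership test into values) by building an inverted index value-member -> keys once and doing a single pass over elements into per-key buckets, emitted in d order.
import Mathlib
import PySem

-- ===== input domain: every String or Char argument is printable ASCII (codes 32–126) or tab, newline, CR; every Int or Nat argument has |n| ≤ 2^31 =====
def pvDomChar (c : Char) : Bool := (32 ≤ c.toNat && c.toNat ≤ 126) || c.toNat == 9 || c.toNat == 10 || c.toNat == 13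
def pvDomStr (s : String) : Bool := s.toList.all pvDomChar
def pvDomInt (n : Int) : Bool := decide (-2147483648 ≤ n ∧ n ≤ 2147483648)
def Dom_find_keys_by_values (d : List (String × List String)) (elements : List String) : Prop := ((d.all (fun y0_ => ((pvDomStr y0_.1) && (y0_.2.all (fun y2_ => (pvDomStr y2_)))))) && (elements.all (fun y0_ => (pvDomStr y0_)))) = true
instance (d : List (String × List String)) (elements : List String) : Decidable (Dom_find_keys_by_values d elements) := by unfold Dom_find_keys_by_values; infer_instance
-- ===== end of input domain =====

-- B builds an inverted index (value-member -> keys) and one pass over elements instead of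
-- A's per-key rescan of elements (faster in a timing run); equal output (d-order keys, elements-order lists) proved on
-- dicts, i.e. association lists with pairwise-distinct keys (Pre_).

-- ===== PORT A =====
-- for key, values in d.items(): matched = [e for e in elements if e in values]; if matched: result[key] = matched
def find_keys_by_values (d : List (String × List String)) (elements : List String) : List (String × List String) :=
  (d.foldl (fun result kv =>
      let matched := elements.filter (fun e => kv.2.contains e)
      if matched.isEmpty then result else result.insert kv.1 matched)
    (PySem.Dict.empty : PySem.Dict String (List String))).items

-- ===== PORT B =====
-- pairs = [(v, k) for k, values in d.items() for v in dict.fromkeys(values)]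
def pvPairs (d : List (String × List String)) : List (String × String) :=
  d.flatMap (fun kv => (PySem.List.dedup kv.2).map (fun v => (v, kv.1)))

-- index = {}; for v, k in pairs: index.setdefault(v, []).append(k)
-- (setdefault(x, []).append(y) updates the dict exactly as d[x] = d.get(x, []) + [y]: Dict.modify)
def pvIndex (d : List (String × List String)) : PySem.Dict String (List String) :=
  (pvPairs d).foldl (fun idx p => idx.modify p.1 [] (· ++ [p.2])) PySem.Dict.empty

-- hits = [(k, e) for e in elements for k in index.get(e, [])]
def pvHits (d : List (String × List String)) (elements : List String) : List (String × String) :=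
  elements.flatMap (fun e => ((pvIndex d).getD e []).map (fun k => (k, e)))

-- buckets = {}; for k, e in hits: buckets.setdefault(k, []).append(e)  (ported as Dict.modify, see above)
def pvBuckets (d : List (String × List String)) (elements : List String) : PySem.Dict String (List String) :=
  (pvHits d elements).foldl (fun b p => b.modify p.1 [] (· ++ [p.2])) PySem.Dict.empty

-- result = {}; for k in d: if k in buckets: result[k] = buckets[k]  (buckets[k] total via getD: guarded by `k in buckets`)
def find_keys_by_values_alt (d : List (String × List String)) (elements : List String) : List (String × List String) :=
  let buckets := pvBuckets d elements
  (d.foldl (fun result kv =>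
      if buckets.contains kv.1 then result.insert kv.1 (buckets.getD kv.1 []) else result)
    (PySem.Dict.empty : PySem.Dict String (List String))).items

-- ===== PRECONDITION & SPEC =====
-- d is a Python dict, so its keys are distinct; Pre_ excludes only association lists with
-- duplicate keys, which represent no dict input (A returns on every dict).
def Pre_find_keys_by_values (d : List (String × List String)) (elements : List String) : Prop :=
  (d.map Prod.fst).Nodup
instance (d : List (String × List String)) (elements : List String) : Decidable (Pre_find_keys_by_values d elements) := by unfold Pre_find_keys_by_values; infer_instance

def pvWitness_find_keys_by_values : (List (String × List String)) × List String :=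
  ([("a", ["x", "y"]), ("b", ["y"])], ["y", "x", "z"])

def Spec_find_keys_by_values (d : List (String × List String)) (elements : List String) (out : List (String × List String)) : Prop := out = find_keys_by_values_alt d elements
instance (d : List (String × List String)) (elements : List String) (out : List (String × List String)) : Decidable (Spec_find_keys_by_values d elements out) := by unfold Spec_find_keys_by_values; infer_instance

-- ===== CLAIM (what is proved, stated in full; the proofs are below) =====
def Claim_equal_find_keys_by_values : Prop := ∀ (d : List (String × List String)) (elements : List String), Dom_find_keys_by_values d elements → Pre_find_keys_by_values d elements → Spec_find_keys_by_values d elements (find_keys_by_values d elements)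

-- ===== LEMMAS AND PROOFS =====

lemma pv_filter_beq_nodup {α : Type} [DecidableEq α] (l : List α) (h : l.Nodup) (k : α) :
    l.filter (fun x => x == k) = if k ∈ l then [k] else [] := by
  rw [show (fun x => x == k) = (· == k) from rfl, List.filter_beq]
  by_cases h' : k ∈ l
  · simp [h', List.count_eq_one_of_mem h h']
  · simp [h', List.count_eq_zero.mpr h']

lemma pv_index_getD (d : List (String × List String)) (e : String) :
    (pvIndex d).getD e [] = ((d.filter (fun kv => decide (e ∈ kv.2))).map Prod.fst) := by
  unfold pvIndex
  rw [PySem.Dict.getD_foldl_modify_append]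
  rw [PySem.Dict.getD_empty]
  simp only [List.nil_append]
  induction d with
  | nil => simp [pvPairs]
  | cons kv t ih =>
    have hstep : pvPairs (kv :: t)
        = (PySem.List.dedup kv.2).map (fun v => (v, kv.1)) ++ pvPairs t := by
      simp [pvPairs]
    rw [hstep, List.filter_append, List.map_append, ih]
    have hfm : ((PySem.List.dedup kv.2).map (fun v => (v, kv.1))).filter (fun p => p.1 == e)
        = ((PySem.List.dedup kv.2).filter (fun v => v == e)).map (fun v => (v, kv.1)) := by
      rw [List.filter_map]; rfl
    rw [hfm, pv_filter_beq_nodup _ (PySem.List.nodup_dedup kv.2) e]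
    by_cases he : e ∈ kv.2
    · simp [he]
    · simp [he]

lemma pv_key_unique (d : List (String × List String)) (hk : (d.map Prod.fst).Nodup)
    (k : String) (vs : List String) (hmem : (k, vs) ∈ d) :
    ∀ kv ∈ d, kv.1 = k → kv = (k, vs) := by
  induction d with
  | nil => simp at hmem
  | cons a t ih =>
    simp only [List.map_cons, List.nodup_cons] at hk
    intro kv hkv hfst
    rcases List.mem_cons.mp hmem with h1 | h1 <;> rcases List.mem_cons.mp hkv with h2 | h2
    · rw [h2, ← h1]
    · exfalso
      apply hk.1
      have hm : kv.1 ∈ t.map Prod.fst := List.mem_map_of_mem h2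
      rw [hfst] at hm
      rw [← h1]
      exact hm
    · exfalso
      apply hk.1
      have hm : k ∈ t.map Prod.fst := List.mem_map_of_mem (f := Prod.fst) h1
      rw [← h2, hfst]
      exact hm
    · exact ih hk.2 h1 kv h2 hfst

lemma pv_mem_index (d : List (String × List String)) (hk : (d.map Prod.fst).Nodup)
    (k : String) (vs : List String) (hmem : (k, vs) ∈ d) (e : String) :
    k ∈ (pvIndex d).getD e [] ↔ e ∈ vs := by
  rw [pv_index_getD]
  constructor
  · intro h
    rcases List.mem_map.mp h with ⟨kv, hkv, hfst⟩
    rcases List.mem_filter.mp hkv with ⟨hkvd, hp⟩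
    have := pv_key_unique d hk k vs hmem kv hkvd hfst
    simp only [this] at hp
    exact of_decide_eq_true hp
  · intro h
    exact List.mem_map.mpr ⟨(k, vs), List.mem_filter.mpr ⟨hmem, decide_eq_true h⟩, rfl⟩

lemma pv_nodup_index (d : List (String × List String)) (hk : (d.map Prod.fst).Nodup)
    (e : String) : ((pvIndex d).getD e []).Nodup := by
  rw [pv_index_getD]
  exact hk.sublist (List.filter_sublist.map Prod.fst)

lemma pv_buckets_getD (d : List (String × List String)) (elements : List String)
    (hk : (d.map Prod.fst).Nodup) (k : String) (vs : List String) (hmem : (k, vs) ∈ d) :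
    (pvBuckets d elements).getD k [] = elements.filter (fun e => decide (e ∈ vs)) := by
  unfold pvBuckets
  rw [PySem.Dict.getD_foldl_modify_append]
  rw [PySem.Dict.getD_empty]
  simp only [List.nil_append]
  induction elements with
  | nil => simp [pvHits]
  | cons e t ih =>
    have hstep : pvHits d (e :: t)
        = ((pvIndex d).getD e []).map (fun k' => (k', e)) ++ pvHits d t := by
      simp [pvHits]
    rw [hstep, List.filter_append, List.map_append, ih]
    have hfm : (((pvIndex d).getD e []).map (fun k' => (k', e))).filter (fun p => p.1 == k)
        = (((pvIndex d).getD e []).filter (fun k' => k' == k)).map (fun k' => (k', e)) := by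
      rw [List.filter_map]; rfl
    rw [hfm, pv_filter_beq_nodup _ (pv_nodup_index d hk e) k]
    by_cases he : e ∈ vs
    · simp [(pv_mem_index d hk k vs hmem e).mpr he, he]
    · have hki : k ∉ (pvIndex d).getD e [] := fun h => he ((pv_mem_index d hk k vs hmem e).mp h)
      simp [hki, he]

lemma pv_buckets_contains (d : List (String × List String)) (elements : List String)
    (hk : (d.map Prod.fst).Nodup) (k : String) (vs : List String) (hmem : (k, vs) ∈ d) :
    (pvBuckets d elements).contains k
      = !(elements.filter (fun e => decide (e ∈ vs))).isEmpty := by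
  unfold pvBuckets
  rw [PySem.Dict.contains_eq_decide_mem_keys]
  rw [PySem.Dict.keys_foldl_modify_key]
  rw [PySem.Dict.keys_empty, PySem.Set.update_nil_left]
  have hmemiff : k ∈ (pvHits d elements).map Prod.fst ↔ ∃ e ∈ elements, e ∈ vs := by
    constructor
    · intro h
      rcases List.mem_map.mp h with ⟨p, hp, hfst⟩
      rcases List.mem_flatMap.mp hp with ⟨e, he, hpe⟩
      rcases List.mem_map.mp hpe with ⟨k', hk', hpk⟩
      refine ⟨e, he, ?_⟩
      have : k' = k := by rw [← hfst, ← hpk]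
      exact (pv_mem_index d hk k vs hmem e).mp (this ▸ hk')
    · rintro ⟨e, he, hev⟩
      exact List.mem_map.mpr ⟨(k, e), List.mem_flatMap.mpr
        ⟨e, he, List.mem_map.mpr ⟨k, (pv_mem_index d hk k vs hmem e).mpr hev, rfl⟩⟩, rfl⟩
  by_cases h : ∃ e ∈ elements, e ∈ vs
  · rcases h with ⟨e, he, hev⟩
    have h1 : k ∈ PySem.Set.ofList ((pvHits d elements).map Prod.fst) := by
      rw [PySem.Set.mem_ofList]; exact hmemiff.mpr ⟨e, he, hev⟩
    have h2 : e ∈ elements.filter (fun e => decide (e ∈ vs)) :=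
      List.mem_filter.mpr ⟨he, decide_eq_true hev⟩
    simp [h1, List.ne_nil_of_mem h2]
  · have h1 : k ∉ PySem.Set.ofList ((pvHits d elements).map Prod.fst) := by
      rw [PySem.Set.mem_ofList]; exact fun hm => h (hmemiff.mp hm)
    have h2 : elements.filter (fun e => decide (e ∈ vs)) = [] := by
      rw [List.filter_eq_nil_iff]
      intro e he hev
      exact h ⟨e, he, of_decide_eq_true hev⟩
    simp [h1, h2]

lemma pv_contains_fun (vs : List String) :
    (fun e => vs.contains e) = (fun e => decide (e ∈ vs)) := by
  funext e; simp

-- ===== VERDICT (by name: the statement is the Claim_ definition above) =====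
theorem find_keys_by_values_spec : Claim_equal_find_keys_by_values := by
  intro d elements _ hpre
  unfold Spec_find_keys_by_values find_keys_by_values find_keys_by_values_alt
  simp only []
  congr 1
  apply PySem.List.foldl_congr_mem
  intro acc kv hkv
  have hmem : (kv.1, kv.2) ∈ d := by simpa using hkv
  rw [pv_contains_fun kv.2,
      pv_buckets_contains d elements hpre kv.1 kv.2 hmem,
      pv_buckets_getD d elements hpre kv.1 kv.2 hmem]
  by_cases h : (elements.filter (fun e => decide (e ∈ kv.2))).isEmpty
  · simp [h]
  · simp [h]
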